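-- pv_equiv track=rewrite | github.com/AnneSpitz/TDLog-TP1 | tp1.py | creation_tableau_valeur
-- ===== SOURCE A (Python) =====
-- def creation_tableau_valeur(group_local, match_local):
--     """Crée un tableau de tuples de la forme (nombre de points, nombre de buts marques, nombre de buts encaisses, pays).
--     Prend en entrée l'ensemble des pays considérés et le tableau de la liste des matches. Renvoie un tableau de tuples.
--     """
--     pays_points = []
--
--     for pays in group_local:
--         nb_points = 0
--         nb_buts_marques = 0
--         nb_buts_encaisses = 0
--
--         for i in range(len(match_local)):
--             # On calcule le nombre de points
--             if pays == match_local[i][0]: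
--                 if match_local[i][1] > match_local[i][2]:
--                     nb_points += 2
--                 if match_local[i][1] == match_local[i][2]:
--                     nb_points += 1
--
--                 nb_buts_marques += match_local[i][1]
--                 nb_buts_encaisses += match_local[i][2]
--
--             if pays == match_local[i][3]:
--                 if match_local[i][1] < match_local[i][2]:
--                     nb_points += 2
--                 if match_local[i][1] == match_local[i][2]:
--                     nb_points += 1
--
--                 nb_buts_marques += match_local[i][2]
--                 nb_buts_encaisses += match_local[i][1]
--
--         pays_points.append((nb_points, nb_buts_marques, nb_buts_encaisses, pays))
--
--     return pays_points
-- ===== SOURCE B (Python) =====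
-- def creation_tableau_valeur(group_local, match_local):
--     """One pass over match_local accumulating (points, scored, conceded) per
--     country in a dict, then emit rows in group_local order."""
--     acc = {}
--
--     def bump(pays, pts, marques, encaisses):
--         p, m, e = acc.get(pays, (0, 0, 0))
--         acc[pays] = (p + pts, m + marques, e + encaisses)
--
--     for home, bh, ba, away in match_local:
--         bump(home, 2 if bh > ba else (1 if bh == ba else 0), bh, ba)
--         bump(away, 2 if bh < ba else (1 if bh == ba else 0), ba, bh)
--
--     result = []
--     for pays in group_local:
--         p, m, e = acc.get(pays, (0, 0, 0))
--         result.append((p, m, e, pays))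
--     return result
-- ===== Notes on version B (the rewrite author's own statement) =====
-- stated objective: faster
-- what changed: Replaces the nested loop (full scan of match_local for every country) with a single pass over match_local that accumulates (points, scored, conceded) per country in a dict, then emits rows in group_local order.
import Mathlib
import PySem

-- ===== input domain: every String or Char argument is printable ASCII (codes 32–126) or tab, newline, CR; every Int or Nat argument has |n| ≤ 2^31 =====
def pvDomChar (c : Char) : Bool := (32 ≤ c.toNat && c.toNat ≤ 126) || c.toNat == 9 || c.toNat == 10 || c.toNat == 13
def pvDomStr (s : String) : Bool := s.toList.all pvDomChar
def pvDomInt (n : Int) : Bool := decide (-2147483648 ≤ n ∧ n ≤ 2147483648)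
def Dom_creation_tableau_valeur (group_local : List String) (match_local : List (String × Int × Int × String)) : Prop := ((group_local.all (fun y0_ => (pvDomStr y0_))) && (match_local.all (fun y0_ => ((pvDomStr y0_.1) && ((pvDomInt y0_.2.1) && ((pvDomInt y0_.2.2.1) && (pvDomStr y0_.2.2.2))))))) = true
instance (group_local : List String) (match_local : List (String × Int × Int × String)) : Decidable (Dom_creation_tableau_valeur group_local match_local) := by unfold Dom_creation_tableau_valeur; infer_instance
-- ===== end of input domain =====

-- B replaces A's per-country rescan of match_local with one dict-accumulating pass (objective: faster, O(P+M) vs O(P*M)).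

-- ===== PORT A =====
-- inner body of A's 'for i in range(len(match_local))' loop for a fixed pays
def pvInnerA (pays : String) (s : Int × Int × Int) (m : String × Int × Int × String) : Int × Int × Int :=
  let s1 : Int × Int × Int :=
    if pays == m.1 then
      (s.1 + (if m.2.1 > m.2.2.1 then 2 else 0) + (if m.2.1 = m.2.2.1 then 1 else 0),
       s.2.1 + m.2.1, s.2.2 + m.2.2.1)
    else s
  if pays == m.2.2.2 then
    (s1.1 + (if m.2.1 < m.2.2.1 then 2 else 0) + (if m.2.1 = m.2.2.1 then 1 else 0),
     s1.2.1 + m.2.2.1, s1.2.2 + m.2.1)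
  else s1

def creation_tableau_valeur (group_local : List String) (match_local : List (String × Int × Int × String)) : List (Int × Int × Int × String) :=
  group_local.foldl (fun pays_points pays =>
    let s := (PySem.List.pyRange 0 match_local.length 1).foldl
      (fun s i => pvInnerA pays s (PySem.List.pyGetD match_local i ("", 0, 0, "")))
      ((0 : Int), (0 : Int), (0 : Int))
    pays_points ++ [(s.1, s.2.1, s.2.2, pays)]) []

-- ===== PORT B =====
-- acc.get(pays,(0,0,0)) updated by (pts, marques, encaisses)
def pvBump (acc : PySem.Dict String (Int × Int × Int)) (pays : String) (pts marques encaisses : Int) : PySem.Dict String (Int × Int × Int) :=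
  let t := acc.getD pays (0, 0, 0)
  acc.insert pays (t.1 + pts, t.2.1 + marques, t.2.2 + encaisses)

def creation_tableau_valeur_alt (group_local : List String) (match_local : List (String × Int × Int × String)) : List (Int × Int × Int × String) :=
  let acc := match_local.foldl (fun acc m =>
    let acc := pvBump acc m.1 (if m.2.1 > m.2.2.1 then 2 else if m.2.1 = m.2.2.1 then 1 else 0) m.2.1 m.2.2.1
    pvBump acc m.2.2.2 (if m.2.1 < m.2.2.1 then 2 else if m.2.1 = m.2.2.1 then 1 else 0) m.2.2.1 m.2.1)
    PySem.Dict.empty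
  group_local.foldl (fun result pays =>
    let t := acc.getD pays (0, 0, 0)
    result ++ [(t.1, t.2.1, t.2.2, pays)]) []

-- ===== PRECONDITION & SPEC =====
def Spec_creation_tableau_valeur (group_local : List String) (match_local : List (String × Int × Int × String)) (out : List (Int × Int × Int × String)) : Prop := out = creation_tableau_valeur_alt group_local match_local
instance (group_local : List String) (match_local : List (String × Int × Int × String)) (out : List (Int × Int × Int × String)) : Decidable (Spec_creation_tableau_valeur group_local match_local out) := by unfold Spec_creation_tableau_valeur; infer_instance

-- ===== CLAIM (what is proved, stated in full; the proofs are below) =====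
def Claim_equal_creation_tableau_valeur : Prop := ∀ (group_local : List String) (match_local : List (String × Int × Int × String)), Dom_creation_tableau_valeur group_local match_local → Spec_creation_tableau_valeur group_local match_local (creation_tableau_valeur group_local match_local)

-- ===== LEMMAS AND PROOFS =====

-- one B step updates pays's accumulated triple exactly as A's inner body does
theorem pvBump_step (acc : PySem.Dict String (Int × Int × Int)) (pays : String) (m : String × Int × Int × String) :
    ((let acc := pvBump acc m.1 (if m.2.1 > m.2.2.1 then 2 else if m.2.1 = m.2.2.1 then 1 else 0) m.2.1 m.2.2.1
      pvBump acc m.2.2.2 (if m.2.1 < m.2.2.1 then 2 else if m.2.1 = m.2.2.1 then 1 else 0) m.2.2.1 m.2.1).getD pays (0, 0, 0))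
    = pvInnerA pays (acc.getD pays (0, 0, 0)) m := by
  simp only [pvBump, pvInnerA, PySem.Dict.getD_insert, beq_iff_eq]
  split_ifs <;> simp_all <;> omega

-- the dict fold computes, for each pays, A's inner fold
theorem pvAcc_eq (pays : String) (l : List (String × Int × Int × String)) (acc : PySem.Dict String (Int × Int × Int)) :
    (l.foldl (fun acc m =>
      let acc := pvBump acc m.1 (if m.2.1 > m.2.2.1 then 2 else if m.2.1 = m.2.2.1 then 1 else 0) m.2.1 m.2.2.1
      pvBump acc m.2.2.2 (if m.2.1 < m.2.2.1 then 2 else if m.2.1 = m.2.2.1 then 1 else 0) m.2.2.1 m.2.1)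
      acc).getD pays (0, 0, 0)
    = l.foldl (pvInnerA pays) (acc.getD pays (0, 0, 0)) := by
  induction l generalizing acc with
  | nil => rfl
  | cons m t ih => simp only [List.foldl_cons, ih, pvBump_step]

-- ===== VERDICT (by name: the statement is the Claim_ definition above) =====
theorem creation_tableau_valeur_spec : Claim_equal_creation_tableau_valeur := by
  intro group_local match_local _
  unfold Spec_creation_tableau_valeur creation_tableau_valeur creation_tableau_valeur_alt
  congr 1
  funext pays_points pays
  rw [PySem.List.foldl_pyRange_zero_pyGetD' match_local ("", (0:Int), (0:Int), "") (pvInnerA pays) ((0:Int),(0:Int),(0:Int)), pvAcc_eq]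
  rfl
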